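-- pv_equiv track=rewrite | github.com/MaiconJonatha/ai-ecosystem | ai-shopee-video/shopee_affiliate_matcher.py | extract_product_name
-- ===== SOURCE A (Python) =====
-- def extract_product_name(url):
--     """Extrai nome do produto da URL"""
--     if not url:
--         return ""
--     # Pegar parte antes de -i.
--     parts = url.split("/")
--     for part in parts:
--         if "-i." in part:
--             name = part.split("-i.")[0].replace("-", " ")
--             return name[:60]
--     return ""
-- ===== SOURCE B (Python) =====
-- def extract_product_name(url):
--     """Extrai nome do produto da URL"""
--     idx = url.find("-i.")
--     if idx == -1:
--         return ""
--     start = url.rfind("/", 0, idx) + 1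
--     return url[start:idx].replace("-", " ")[:60]
-- ===== Notes on version B (the rewrite author's own statement) =====
-- stated objective: simpler
-- what changed: B replaces A's split-the-URL-on-'/'-and-scan-the-parts loop (plus an inner split on '-i.') with direct index arithmetic on the raw string: find the first '-i.', rfind the preceding '/', and slice between the two.
import Mathlib
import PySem

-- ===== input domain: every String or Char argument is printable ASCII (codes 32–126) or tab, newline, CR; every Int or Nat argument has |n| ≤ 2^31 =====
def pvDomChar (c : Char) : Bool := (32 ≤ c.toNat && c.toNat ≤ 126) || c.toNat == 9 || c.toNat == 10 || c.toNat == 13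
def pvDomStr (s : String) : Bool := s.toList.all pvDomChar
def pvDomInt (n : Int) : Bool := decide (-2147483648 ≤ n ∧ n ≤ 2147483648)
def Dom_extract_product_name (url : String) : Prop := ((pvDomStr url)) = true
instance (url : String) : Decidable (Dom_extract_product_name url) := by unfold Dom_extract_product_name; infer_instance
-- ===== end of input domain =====

-- B replaces A's split-on-"/"-and-scan-parts with direct find/rfind index arithmetic on the raw string (objective: simpler).

-- ===== PORT A =====
-- the 'for part in parts' loop: first part containing "-i." yields the name
def extract_product_name_loop : List String → String
  | [] => ""
  | part :: rest =>
    if PySem.Str.isIn "-i." part then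
      -- part.split("-i.")[0]: the separator is nonempty so split? is some, and the
      -- resulting list is never empty, so the [0] indexing never raises (headD)
      PySem.Str.slice
        (PySem.Str.replace (((PySem.Str.split? part "-i.").getD []).headD "") "-" " ")
        none (some 60)
    else extract_product_name_loop rest

def extract_product_name (url : String) : String :=
  if url = "" then ""
  else extract_product_name_loop ((PySem.Str.split? url "/").getD [])

-- ===== PORT B =====
def extract_product_name_alt (url : String) : String :=
  let idx := PySem.Str.find url "-i."
  if idx = -1 then ""
  else
    let start := PySem.Str.rfindFrom url "/" 0 (some idx) + 1
    PySem.Str.slice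
      (PySem.Str.replace (PySem.Str.slice url (some start) (some idx)) "-" " ")
      none (some 60)

-- ===== PRECONDITION & SPEC =====
def Spec_extract_product_name (url : String) (out : String) : Prop := out = extract_product_name_alt url
instance (url : String) (out : String) : Decidable (Spec_extract_product_name url out) := by unfold Spec_extract_product_name; infer_instance

-- ===== CLAIM (what is proved, stated in full; the proofs are below) =====
def Claim_equal_extract_product_name : Prop := ∀ (url : String), Dom_extract_product_name url → Spec_extract_product_name url (extract_product_name url)

-- ===== LEMMAS AND PROOFS =====

-- the two literal character lists "-i." and "-", " " as List Char
def pvSub : List Char := ['-', 'i', '.']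

-- ---- facts about PySem.Chars.find ----

lemma pv_find_nil (sub : List Char) :
    PySem.Chars.find [] sub = if sub.isEmpty then 0 else -1 := by
  simp [PySem.Chars.find, PySem.Chars.find.go]

lemma pv_find_go_shift (sub : List Char) : ∀ (l : List Char) (k : Nat),
    PySem.Chars.find.go sub l k =
      if PySem.Chars.find l sub = -1 then -1 else k + PySem.Chars.find l sub := by
  intro l
  induction l with
  | nil =>
    intro k
    simp only [PySem.Chars.find, PySem.Chars.find.go]
    by_cases h : sub.isEmpty <;> simp [h]
  | cons c t ih =>
    intro k
    conv_lhs => rw [PySem.Chars.find.go]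
    conv_rhs => rw [PySem.Chars.find]
    conv_rhs => rw [PySem.Chars.find.go]
    by_cases hp : sub.isPrefixOf (c :: t)
    · simp [hp]
    · simp only [hp, if_false, Bool.false_eq_true]
      rw [ih (k+1), ih 1]
      by_cases h : PySem.Chars.find t sub = -1
      · simp [h]
      · have hge := PySem.Chars.neg_one_le_find t sub
        rw [if_neg h, if_neg (by omega)]
        push_cast
        omega
lemma pv_find_cons (sub : List Char) (c : Char) (t : List Char) :
    PySem.Chars.find (c :: t) sub =
      if sub.isPrefixOf (c :: t) then 0
      else if PySem.Chars.find t sub = -1 then -1 else 1 + PySem.Chars.find t sub := by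
  conv_lhs => rw [PySem.Chars.find]
  conv_lhs => rw [PySem.Chars.find.go]
  by_cases hp : sub.isPrefixOf (c :: t)
  · simp [hp]
  · simp only [hp, if_false, Bool.false_eq_true]
    rw [pv_find_go_shift]
    norm_num
lemma pv_single_prefix (c : Char) (m : List Char) : [c] <+: m ↔ m.head? = some c := by
  cases m with
  | nil => simp
  | cons x t => simp [List.cons_prefix_iff]

lemma pv_single_prefix_drop (c : Char) (l : List Char) (j : Nat) :
    [c] <+: l.drop j ↔ l[j]? = some c := by
  rw [pv_single_prefix, List.head?_drop]

-- find on an append around a character not in sub: no occurrence straddles the split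
lemma pv_prefix_append_cons {sub : List Char} {c : Char} (hc : c ∉ sub) (a b : List Char) :
    sub <+: a ++ c :: b ↔ sub <+: a := by
  constructor
  · intro h
    by_cases hl : sub.length ≤ a.length
    · have := List.prefix_iff_eq_take.mp h
      rw [List.take_append_of_le_length hl] at this
      exact this ▸ List.take_prefix _ _
    · exfalso
      apply hc
      have h1 : sub[a.length]? = some c := by
        have := List.prefix_iff_eq_take.mp h
        rw [this]
        rw [List.getElem?_take_of_lt (by omega)]
        rw [List.getElem?_append_right (by omega)]
        simp
      exact List.mem_of_getElem? h1
  · intro h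
    exact h.trans (List.prefix_append a (c :: b))
lemma pv_find_append {sub : List Char} (hsub : sub ≠ []) {c : Char} (hc : c ∉ sub) :
    ∀ (a b : List Char),
    PySem.Chars.find (a ++ c :: b) sub =
      if PySem.Chars.find a sub = -1 then
        (if PySem.Chars.find b sub = -1 then -1
         else (a.length : Int) + 1 + PySem.Chars.find b sub)
      else PySem.Chars.find a sub := by
  intro a
  induction a with
  | nil =>
    intro b
    have hnp : ¬ sub.isPrefixOf (c :: b) := by
      simp only [List.isPrefixOf_iff_prefix]
      intro h
      exact hsub (List.prefix_nil.mp ((pv_prefix_append_cons hc [] b).mp h))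
    rw [List.nil_append, pv_find_cons, if_neg hnp, pv_find_nil]
    have he : sub.isEmpty = false := by simp [hsub]
    rw [he]
    by_cases hb : PySem.Chars.find b sub = -1 <;> simp [hb]
  | cons ch a' ih =>
    intro b
    have hb1 := PySem.Chars.neg_one_le_find b sub
    have ha1 := PySem.Chars.neg_one_le_find a' sub
    have hpiff : sub.isPrefixOf (ch :: (a' ++ c :: b)) = sub.isPrefixOf (ch :: a') := by
      rw [Bool.eq_iff_iff]
      simp only [List.isPrefixOf_iff_prefix]
      exact pv_prefix_append_cons hc (ch :: a') b
    rw [List.cons_append, pv_find_cons, pv_find_cons, ih b, hpiff]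
    split_ifs <;> push_cast [List.length_cons] <;> first | contradiction | omega
-- ---- Python split as repeated first-occurrence splitting ----

def pySplit (sep : List Char) (s : List Char) : List (List Char) :=
  if h : sep.isEmpty ∨ PySem.Chars.find s sep = -1 then [s]
  else
    s.take (PySem.Chars.find s sep).toNat ::
      pySplit sep (s.drop ((PySem.Chars.find s sep).toNat + sep.length))
termination_by s.length
decreasing_by
  obtain ⟨h1, h2⟩ := not_or.mp h
  have hin : sep <:+: s := (PySem.Chars.find_ne_neg_one_iff s sep).mp h2
  have hle : sep.length ≤ s.length := hin.length_le
  have hpos : 0 < sep.length := by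
    cases sep <;> simp_all
  simp only [List.length_drop]
  omega

lemma pv_pySplit_neg {sep s : List Char} (h : PySem.Chars.find s sep = -1) :
    pySplit sep s = [s] := by
  rw [pySplit]
  simp [h]

lemma pv_pySplit_pos {sep s : List Char} (hsep : ¬ sep.isEmpty)
    (h : PySem.Chars.find s sep ≠ -1) :
    pySplit sep s =
      s.take (PySem.Chars.find s sep).toNat ::
        pySplit sep (s.drop ((PySem.Chars.find s sep).toNat + sep.length)) := by
  rw [pySplit]; simp [h, hsep]

lemma pv_go_split {sep : List Char} (hsep : sep ≠ []) :
    ∀ (fuel : Nat) (l cur : List Char) (acc : List (List Char)), l.length ≤ fuel →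
      PySem.Chars.splitOn.go sep fuel l cur acc =
        acc.reverse ++ (pySplit sep l).modifyHead (cur.reverse ++ ·) := by
  have hse : sep.isEmpty = false := by cases sep <;> simp_all
  have hnil : PySem.Chars.find [] sep = -1 := by rw [pv_find_nil, hse]; rfl
  intro fuel
  induction fuel with
  | zero =>
    intro l cur acc hl
    have hl0 : l = [] := List.length_eq_zero_iff.mp (Nat.le_zero.mp hl)
    subst hl0
    rw [PySem.Chars.splitOn.go.eq_def]
    rw [pv_pySplit_neg hnil]
    simp
  | succ fuel ih =>
    intro l cur acc hl
    cases l with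
    | nil =>
      rw [PySem.Chars.splitOn.go.eq_def, pv_pySplit_neg hnil]
      simp
    | cons ch rest =>
      rw [PySem.Chars.splitOn.go.eq_def]
      simp only []
      have hpos : 0 < sep.length := List.length_pos_iff.mpr hsep
      simp only [List.length_cons] at hl
      by_cases hp : sep.isPrefixOf (ch :: rest)
      · rw [if_pos hp]
        have hfind : PySem.Chars.find (ch :: rest) sep = 0 := by
          rw [pv_find_cons, if_pos hp]
        rw [pv_pySplit_pos (s := ch :: rest) (by simp [hse]) (by rw [hfind]; omega)]
        rw [hfind]
        rw [ih _ _ _ (by simp only [List.length_drop, List.length_cons]; omega)]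
        simp only [List.reverse_cons, List.append_assoc, List.singleton_append]
        cases hps : pySplit sep (List.drop sep.length (ch :: rest)) <;> simp [hps]
      · rw [if_neg hp]
        have hfind := pv_find_cons sep ch rest
        rw [if_neg hp] at hfind
        rw [ih _ _ _ (by omega)]
        by_cases hr : PySem.Chars.find rest sep = -1
        · rw [hr, if_pos rfl] at hfind
          rw [pv_pySplit_neg hfind, pv_pySplit_neg hr]
          simp
        · rw [if_neg hr] at hfind
          have hr0 : 0 ≤ PySem.Chars.find rest sep := by
            have := PySem.Chars.neg_one_le_find rest sep
            omega
          rw [pv_pySplit_pos (s := ch :: rest) (by simp [hse]) (by rw [hfind]; omega),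
              pv_pySplit_pos (s := rest) (by simp [hse]) hr, hfind]
          have ht : (1 + PySem.Chars.find rest sep).toNat = (PySem.Chars.find rest sep).toNat + 1 := by omega
          rw [ht]
          simp only [List.take_succ_cons, List.modifyHead_cons]
          have hd : (PySem.Chars.find rest sep).toNat + 1 + sep.length
              = ((PySem.Chars.find rest sep).toNat + sep.length) + 1 := by omega
          rw [hd, List.drop_succ_cons]
          simp

lemma pv_splitOn_eq_pySplit {sep : List Char} (hsep : sep ≠ []) (s : List Char) :
    PySem.Chars.splitOn s sep = pySplit sep s := by
  rw [PySem.Chars.splitOn]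
  rw [pv_go_split hsep _ _ _ _ (by omega)]
  cases hps : pySplit sep s <;> simp [hps]

-- ---- facts about PySem.Chars.rfind ----

lemma pv_rfind_go_zero (s sub : List Char) :
    PySem.Chars.rfind.go s sub 0 = if sub.isPrefixOf s then 0 else -1 := by
  rw [PySem.Chars.rfind.go]

lemma pv_rfind_go_succ (s sub : List Char) (j : Nat) :
    PySem.Chars.rfind.go s sub (j + 1) =
      if sub.isPrefixOf (s.drop (j + 1)) then ((j : Int) + 1)
      else PySem.Chars.rfind.go s sub j := by
  rw [PySem.Chars.rfind.go]; push_cast; rfl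

lemma pv_rfind_go_le (s sub : List Char) : ∀ k : Nat, PySem.Chars.rfind.go s sub k ≤ k := by
  intro k
  induction k with
  | zero => rw [pv_rfind_go_zero]; split <;> omega
  | succ j ih => rw [pv_rfind_go_succ]; split <;> push_cast <;> omega

lemma pv_neg_one_le_rfind_go (s sub : List Char) : ∀ k : Nat, -1 ≤ PySem.Chars.rfind.go s sub k := by
  intro k
  induction k with
  | zero => rw [pv_rfind_go_zero]; split <;> omega
  | succ j ih => rw [pv_rfind_go_succ]; split <;> push_cast <;> omega

lemma pv_rfind_go_not_mem {c : Char} {s : List Char} (hc : c ∉ s) :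
    ∀ k : Nat, PySem.Chars.rfind.go s [c] k = -1 := by
  intro k
  have hnp : ∀ j : Nat, ¬ [c].isPrefixOf (s.drop j) := by
    intro j h
    rw [List.isPrefixOf_iff_prefix, pv_single_prefix_drop] at h
    exact hc (List.mem_of_getElem? h)
  induction k with
  | zero => rw [pv_rfind_go_zero, if_neg (by simpa using hnp 0)]
  | succ j ih => rw [pv_rfind_go_succ, if_neg (by simpa using hnp (j+1)), ih]

lemma pv_rfind_not_mem {c : Char} {s : List Char} (hc : c ∉ s) :
    PySem.Chars.rfind s [c] = -1 := by
  rw [PySem.Chars.rfind]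
  exact pv_rfind_go_not_mem hc _

lemma pv_rfind_go_append {c : Char} {a : List Char} (hc : c ∉ a) (x : List Char) :
    ∀ m : Nat, PySem.Chars.rfind.go (a ++ c :: x) [c] (a.length + 1 + m) =
      if PySem.Chars.rfind.go x [c] m = -1 then (a.length : Int)
      else (a.length : Int) + 1 + PySem.Chars.rfind.go x [c] m := by
  have hkey : ∀ m : Nat, (a ++ c :: x).drop (a.length + 1 + m) = x.drop m := by
    intro m
    rw [List.drop_append]
    rw [List.drop_eq_nil_of_le (by omega), show a.length + 1 + m - a.length = m + 1 by omega]
    simp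
  have hmid : PySem.Chars.rfind.go (a ++ c :: x) [c] a.length = (a.length : Int) := by
    cases ha : a with
    | nil =>
      simp only [List.nil_append, List.length_nil]
      rw [pv_rfind_go_zero, if_pos (by simp [List.isPrefixOf_iff_prefix, pv_single_prefix])]
      simp
    | cons ch a' =>
      rw [show (ch :: a').length = a'.length + 1 from rfl, pv_rfind_go_succ]
      rw [if_pos]
      · push_cast; ring
      · rw [show a'.length + 1 = (ch :: a').length from rfl, ← ha, List.drop_left]
        simp [List.isPrefixOf_iff_prefix, pv_single_prefix]
  intro m
  induction m with
  | zero =>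
    rw [show a.length + 1 + 0 = a.length + 1 from rfl, pv_rfind_go_succ, hkey 0]
    rw [pv_rfind_go_zero]
    simp only [List.drop_zero]
    by_cases hp : [c].isPrefixOf x
    · rw [if_pos hp, if_pos hp, if_neg (by omega)]
      push_cast; ring
    · rw [if_neg hp, if_neg hp, if_pos rfl, hmid]
  | succ m ih =>
    rw [show a.length + 1 + (m + 1) = (a.length + 1 + m) + 1 from by omega, pv_rfind_go_succ,
      Nat.add_assoc (a.length + 1) m 1, hkey (m+1)]
    rw [pv_rfind_go_succ (s := x)]
    by_cases hp : [c].isPrefixOf (List.drop (m+1) x)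
    · rw [if_pos hp, if_pos hp, if_neg (by push_cast; omega)]
      push_cast
      ring
    · rw [if_neg hp, if_neg hp, ih]

lemma pv_rfind_append {c : Char} {a : List Char} (hc : c ∉ a) (x : List Char) :
    PySem.Chars.rfind (a ++ c :: x) [c] =
      if PySem.Chars.rfind x [c] = -1 then (a.length : Int)
      else (a.length : Int) + 1 + PySem.Chars.rfind x [c] := by
  simp only [PySem.Chars.rfind]
  have hlen : (a ++ c :: x).length = a.length + 1 + x.length := by
    simp [List.length_append]
    omega
  rw [hlen]
  exact pv_rfind_go_append hc x x.length

lemma pv_rfindFrom_zero (s sub : List Char) (e : Int) (h0 : 0 ≤ e) (hl : e ≤ s.length) :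
    PySem.Chars.rfindFrom s sub 0 (some e) = PySem.Chars.rfind (s.take e.toNat) sub := by
  simp only [PySem.Chars.rfindFrom]
  rw [if_neg (by push_cast; omega)]
  rw [if_neg (not_lt.mpr hl), if_neg (not_lt.mpr h0), if_neg (lt_irrefl 0)]
  simp only [Int.toNat_zero, List.drop_zero, zero_add]
  split <;> omega

-- ---- the two programs at the List Char level ----

def loopC : List (List Char) → List Char
  | [] => []
  | p :: rest =>
    if PySem.Chars.isIn pvSub p then
      PySem.Chars.slice (PySem.Chars.replace ((pySplit pvSub p).headD []) ['-'] [' ']) none (some 60)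
    else loopC rest

def runB (s : List Char) : List Char :=
  if PySem.Chars.find s pvSub = -1 then []
  else
    PySem.Chars.slice
      (PySem.Chars.replace
        (PySem.Chars.slice s
          (some (PySem.Chars.rfindFrom s ['/'] 0 (some (PySem.Chars.find s pvSub)) + 1))
          (some (PySem.Chars.find s pvSub)))
        ['-'] [' '])
      none (some 60)

lemma pv_first_slash_decomp {s : List Char} {j : Int} (h : PySem.Chars.find s ['/'] = j)
    (hj : j ≠ -1) :
    ∃ a b, s = a ++ '/' :: b ∧ '/' ∉ a ∧ (a.length : Int) = j := by
  have h1 := PySem.Chars.neg_one_le_find s ['/']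
  have h0 : 0 ≤ PySem.Chars.find s ['/'] := by omega
  obtain ⟨hpre, hmin⟩ := PySem.Chars.find_spec (s := s) (sub := ['/']) h0
  set jn := (PySem.Chars.find s ['/']).toNat with hjn
  have hget : s[jn]? = some '/' := (pv_single_prefix_drop _ _ _).mp hpre
  have hlt : jn < s.length := (List.getElem?_eq_some_iff.mp hget).1
  refine ⟨s.take jn, s.drop (jn + 1), ?_, ?_, ?_⟩
  · conv_lhs => rw [← List.take_append_drop jn s]
    congr 1
    rw [← List.getElem_cons_drop hlt]
    congr 1
    exact (List.getElem?_eq_some_iff.mp hget).2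
  · intro hmem
    obtain ⟨k, hk, hkeq⟩ := List.getElem_of_mem hmem
    rw [List.getElem_take] at hkeq
    have hklt : k < jn := by
      have := List.length_take_le jn s
      omega
    exact hmin k hklt ((pv_single_prefix_drop _ _ _).mpr
      (List.getElem?_eq_some_iff.mpr ⟨by omega, hkeq⟩))
  · rw [List.length_take]
    omega

lemma pv_neg_one_le_rfind (x sub : List Char) : -1 ≤ PySem.Chars.rfind x sub := by
  rw [PySem.Chars.rfind]; exact pv_neg_one_le_rfind_go x sub x.length

lemma pv_rfind_le (x sub : List Char) : PySem.Chars.rfind x sub ≤ x.length := by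
  rw [PySem.Chars.rfind]; exact pv_rfind_go_le x sub x.length

lemma pv_mainC : ∀ (n : Nat) (s : List Char), s.length ≤ n →
    loopC (pySplit ['/'] s) = runB s := by
  intro n
  induction n with
  | zero =>
    intro s hl
    have hs : s = [] := List.length_eq_zero_iff.mp (Nat.le_zero.mp hl)
    subst hs
    rw [pv_pySplit_neg (by decide)]
    decide
  | succ n ih =>
    intro s hl
    by_cases hslash : PySem.Chars.find s ['/'] = -1
    · -- no '/' in s: the split has a single part, and B's rfind finds nothing
      have hcs : '/' ∉ s := fun hmem =>
        ((PySem.Chars.find_eq_neg_one_iff s ['/']).mp hslash)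
          ((List.singleton_infix_iff '/' s).mpr hmem)
      rw [pv_pySplit_neg hslash]
      by_cases hsub : PySem.Chars.find s pvSub = -1
      · simp only [loopC]
        rw [if_neg (by simp [PySem.Chars.isIn, hsub]), runB, if_pos hsub]
      · have hnn : 0 ≤ PySem.Chars.find s pvSub := by
          have := PySem.Chars.neg_one_le_find s pvSub; omega
        have hIle : PySem.Chars.find s pvSub ≤ s.length := PySem.Chars.find_le_length s pvSub
        simp only [loopC]
        rw [if_pos (by simp [PySem.Chars.isIn, hsub]), runB, if_neg hsub]
        rw [pv_pySplit_pos (by decide) hsub]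
        simp only [List.headD_cons]
        rw [pv_rfindFrom_zero s ['/'] _ hnn hIle]
        rw [pv_rfind_not_mem (fun hm => hcs (List.mem_of_mem_take hm))]
        norm_num
        congr 2
        rw [PySem.List.slice_to _ hnn]
    · -- s = a ++ '/' :: b with '/' ∉ a
      obtain ⟨a, b, hs, hca, hal⟩ := pv_first_slash_decomp rfl hslash
      subst hs
      have hsub3 : pvSub ≠ [] := by decide
      have hcs3 : '/' ∉ pvSub := by decide
      have hlen : (a ++ '/' :: b).length = a.length + 1 + b.length := by
        simp [List.length_append]; omega
      have hdropS : ∀ m : Nat, (a ++ '/' :: b).drop (a.length + 1 + m) = b.drop m := by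
        intro m
        rw [List.drop_append, List.drop_eq_nil_of_le (by omega),
          show a.length + 1 + m - a.length = m + 1 by omega]
        simp
      have hfs := pv_find_append hsub3 hcs3 a b
      have hsplit : pySplit ['/'] (a ++ '/' :: b) = a :: pySplit ['/'] b := by
        rw [pv_pySplit_pos (by decide) hslash, ← hal]
        simp only [Int.toNat_natCast, List.take_left]
        congr 1
        rw [show a.length + (['/'] : List Char).length = a.length + 1 + 0 by simp, hdropS 0]
        simp
      rw [hsplit]
      simp only [loopC]
      by_cases ha : PySem.Chars.find a pvSub = -1
      · -- the first part has no "-i."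
        rw [if_neg (by simp [PySem.Chars.isIn, ha])]
        rw [ih b (by omega)]
        rw [if_pos ha] at hfs
        by_cases hb : PySem.Chars.find b pvSub = -1
        · rw [hb, if_pos rfl] at hfs
          rw [runB, runB, if_pos hb, if_pos hfs]
        · rw [if_neg hb] at hfs
          have hbnn : 0 ≤ PySem.Chars.find b pvSub := by
            have := PySem.Chars.neg_one_le_find b pvSub; omega
          have hble : PySem.Chars.find b pvSub ≤ b.length := PySem.Chars.find_le_length b pvSub
          set ibn := (PySem.Chars.find b pvSub).toNat with hibn
          have hib : PySem.Chars.find b pvSub = (ibn : Int) := by omega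
          rw [runB, runB, if_neg hb, if_neg (by rw [hfs]; omega)]
          rw [hfs, hib]
          rw [pv_rfindFrom_zero b ['/'] _ (by omega) (by omega)]
          rw [pv_rfindFrom_zero _ ['/'] _ (by omega) (by rw [hlen]; push_cast; omega)]
          rw [show ((a.length : Int) + 1 + (ibn : Int)).toNat = a.length + 1 + ibn by omega]
          have htake : (a ++ '/' :: b).take (a.length + 1 + ibn) = a ++ '/' :: b.take ibn := by
            rw [List.take_append, List.take_of_length_le (by omega),
              show a.length + 1 + ibn - a.length = ibn + 1 by omega, List.take_succ_cons]
          rw [htake, Int.toNat_natCast, pv_rfind_append hca (b.take ibn)]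
          have hrge := pv_neg_one_le_rfind (b.take ibn) ['/']
          have hrle := pv_rfind_le (b.take ibn) ['/']
          have hrlen : (b.take ibn).length ≤ ibn := by
            rw [List.length_take]; omega
          by_cases hr : PySem.Chars.rfind (b.take ibn) ['/'] = -1
          · rw [if_pos hr, hr]
            congr 2
            simp only [PySem.Chars.slice_eq_listSlice]
            norm_num
            rw [PySem.List.slice_toNat _ (by omega) (by push_cast; omega),
              show ((a.length : Int) + 1).toNat = a.length + 1 + 0 by omega, hdropS 0,
              show (((a.length : Int) + 1 + (ibn : Int)).toNat - (a.length + 1 + 0)) = ibn by omega]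
            simp
          · set rn := (PySem.Chars.rfind (b.take ibn) ['/']).toNat with hrn
            have hreq : PySem.Chars.rfind (b.take ibn) ['/'] = (rn : Int) := by omega
            rw [if_neg hr, hreq]
            congr 2
            simp only [PySem.Chars.slice_eq_listSlice]
            rw [PySem.List.slice_toNat _ (by omega) (by push_cast; omega)]
            rw [PySem.List.slice_toNat _ (by omega) (by push_cast; omega)]
            rw [show ((rn : Int) + 1).toNat = rn + 1 by omega,
              show ((a.length : Int) + 1 + (rn : Int) + 1).toNat = a.length + 1 + (rn + 1) by omega]
            rw [hdropS (rn + 1),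
              show (((a.length : Int) + 1 + (ibn : Int)).toNat - (a.length + 1 + (rn + 1))) = ibn - (rn + 1) by omega,
              show (((ibn : Int)).toNat - (rn + 1)) = ibn - (rn + 1) by omega]
      · -- "-i." occurs in the first part
        rw [if_pos (by simp [PySem.Chars.isIn, ha])]
        rw [if_neg ha] at hfs
        have hann : 0 ≤ PySem.Chars.find a pvSub := by
          have := PySem.Chars.neg_one_le_find a pvSub; omega
        have hale : PySem.Chars.find a pvSub ≤ a.length := PySem.Chars.find_le_length a pvSub
        set ian := (PySem.Chars.find a pvSub).toNat with hian
        have hia : PySem.Chars.find a pvSub = (ian : Int) := by omega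
        rw [runB, if_neg (by rw [hfs]; omega), hfs, hia]
        rw [pv_rfindFrom_zero _ ['/'] _ (by omega) (by rw [hlen]; push_cast; omega)]
        rw [Int.toNat_natCast, List.take_append_of_le_length (by omega)]
        rw [pv_rfind_not_mem (fun hm => hca (List.mem_of_mem_take hm))]
        rw [pv_pySplit_pos (by decide) ha, hia]
        simp only [List.headD_cons, Int.toNat_natCast]
        norm_num
        congr 2
        rw [List.take_append_of_le_length (by omega)]

-- ---- lifting String-level ports to the List Char level ----

lemma pv_sub_toList : "-i.".toList = pvSub := by decide

lemma pv_loop_lift : ∀ ps : List (List Char),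
    extract_product_name_loop (ps.map String.ofList) = String.ofList (loopC ps) := by
  intro ps
  induction ps with
  | nil => rfl
  | cons p rest ih =>
    simp only [List.map_cons, extract_product_name_loop, loopC]
    rw [show PySem.Str.isIn "-i." (String.ofList p) = PySem.Chars.isIn pvSub p from by
      simp [PySem.Str.isIn, pv_sub_toList]]
    by_cases hin : PySem.Chars.isIn pvSub p
    · rw [if_pos hin, if_pos hin]
      rw [show PySem.Str.split? (String.ofList p) "-i." =
          some ((PySem.Chars.splitOn p pvSub).map String.ofList) from by
        simp [PySem.Str.split?, PySem.Chars.split?, pv_sub_toList, pvSub]]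
      rw [Option.getD_some, pv_splitOn_eq_pySplit (by decide) p]
      cases hsp : pySplit pvSub p with
      | nil => decide
      | cons q t =>
        simp only [List.map_cons, List.headD_cons]
        simp [PySem.Str.slice, PySem.Str.replace, String.toList_ofList,
          show "-".toList = ['-'] from by decide, show " ".toList = [' '] from by decide]
    · rw [if_neg hin, if_neg hin, ih]

lemma pv_alt_eq (url : String) :
    extract_product_name_alt url = String.ofList (runB url.toList) := by
  unfold extract_product_name_alt runB
  simp only [PySem.Str.find, PySem.Str.rfindFrom_eq, PySem.Str.slice, PySem.Str.replace,
    pv_sub_toList, String.toList_ofList,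
    show "/".toList = ['/'] from by decide, show "-".toList = ['-'] from by decide,
    show " ".toList = [' '] from by decide]
  split <;> rfl

lemma pv_A_eq (url : String) (h : url ≠ "") :
    extract_product_name url = String.ofList (loopC (pySplit ['/'] url.toList)) := by
  unfold extract_product_name
  rw [if_neg h]
  rw [show PySem.Str.split? url "/" =
      some ((PySem.Chars.splitOn url.toList ['/']).map String.ofList) from by
    simp [PySem.Str.split?, PySem.Chars.split?]]
  rw [Option.getD_some, pv_loop_lift, pv_splitOn_eq_pySplit (by decide)]

-- ===== VERDICT (by name: the statement is the Claim_ definition above) =====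
theorem extract_product_name_spec : Claim_equal_extract_product_name := by
  intro url _
  unfold Spec_extract_product_name
  by_cases h : url = ""
  · subst h
    rfl
  · rw [pv_A_eq url h, pv_alt_eq url, pv_mainC url.toList.length url.toList le_rfl]
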